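-- pv_equiv track=rewrite | github.com/michaelimmanuel/SortingVisualizer | mergesort.py | getColourArray
-- ===== SOURCE A (Python) =====
-- def getColourArray(length, left, middle, right):
--     colourArray = []
--     for i in range(length):
--         if i >= left and i <= right:
--             if i <= middle:
--                 colourArray.append("green")  # green
--             else:
--                 colourArray.append("red")  # pink
--         else:
--             colourArray.append("white")  # blue
--
--     return colourArray
-- ===== SOURCE B (Python) =====
-- def getColourArray(length, left, middle, right):
--     n = max(length, 0)
--     start = min(max(left, 0), n)
--     end = max(min(right + 1, n), start)
--     gEnd = min(max(middle + 1, start), end)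
--     return (["white"] * start
--             + ["green"] * (gEnd - start)
--             + ["red"] * (end - gEnd)
--             + ["white"] * (n - end))
-- ===== Notes on version B (the rewrite author's own statement) =====
-- stated objective: alternative
-- what changed: B computes the clamped segment boundaries arithmetically and returns a closed-form concatenation of four replicated blocks (white ++ green ++ red ++ white), with no per-index loop or conditional at all.
import Mathlib
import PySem

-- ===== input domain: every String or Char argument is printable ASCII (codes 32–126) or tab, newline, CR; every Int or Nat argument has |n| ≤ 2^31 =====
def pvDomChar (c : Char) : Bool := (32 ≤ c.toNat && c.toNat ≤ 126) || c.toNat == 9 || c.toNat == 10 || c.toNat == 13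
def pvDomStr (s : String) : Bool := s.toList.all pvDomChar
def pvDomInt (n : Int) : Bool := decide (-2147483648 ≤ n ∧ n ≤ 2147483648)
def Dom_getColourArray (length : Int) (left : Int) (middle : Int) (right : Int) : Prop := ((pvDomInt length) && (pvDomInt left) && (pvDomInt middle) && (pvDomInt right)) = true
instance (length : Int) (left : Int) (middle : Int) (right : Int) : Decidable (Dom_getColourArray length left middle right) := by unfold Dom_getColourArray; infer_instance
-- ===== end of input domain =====

-- B replaces A's per-index classification loop by a closed-form concatenation of four replicated colour blocks; alternative decomposition, same cost.
-- ===== PORT A =====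
-- A: one pass over range(length), classifying each index with nested conditionals.
def getColourArray (length : Int) (left : Int) (middle : Int) (right : Int) : List String :=
  (PySem.List.pyRange 0 length 1).foldl
    (fun colourArray i =>
      if left ≤ i ∧ i ≤ right then
        if i ≤ middle then colourArray ++ ["green"] else colourArray ++ ["red"]
      else colourArray ++ ["white"]) []

-- ===== PORT B =====
-- B: compute clamped segment boundaries and concatenate four replicated blocks, no loop.
def getColourArray_alt (length : Int) (left : Int) (middle : Int) (right : Int) : List String :=
  let n := max length 0
  let start := min (max left 0) n
  let stop := max (min (right + 1) n) start
  let gEnd := min (max (middle + 1) start) stop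
  List.replicate start.toNat "white"
    ++ (List.replicate (gEnd - start).toNat "green"
    ++ (List.replicate (stop - gEnd).toNat "red"
    ++ List.replicate (n - stop).toNat "white"))

-- ===== PRECONDITION & SPEC =====
def Spec_getColourArray (length : Int) (left : Int) (middle : Int) (right : Int) (out : List String) : Prop := out = getColourArray_alt length left middle right
instance (length : Int) (left : Int) (middle : Int) (right : Int) (out : List String) : Decidable (Spec_getColourArray length left middle right out) := by unfold Spec_getColourArray; infer_instance

-- ===== CLAIM =====
def Claim_equal_getColourArray : Prop := ∀ (length : Int) (left : Int) (middle : Int) (right : Int), Dom_getColourArray length left middle right → Spec_getColourArray length left middle right (getColourArray length left middle right)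

-- ===== LEMMAS AND PROOFS =====

-- A's append-fold is a map over the range.
theorem foldl_append_ite3 (left middle right : Int) (l : List Int) (acc : List String) :
    l.foldl (fun colourArray i =>
      if left ≤ i ∧ i ≤ right then
        if i ≤ middle then colourArray ++ ["green"] else colourArray ++ ["red"]
      else colourArray ++ ["white"]) acc
    = acc ++ l.map (fun i =>
        if left ≤ i ∧ i ≤ right then (if i ≤ middle then "green" else "red") else "white") := by
  induction l generalizing acc with
  | nil => simp
  | cons x xs ih =>
    simp only [List.foldl_cons, List.map_cons]
    split_ifs <;> simp [ih]

-- getElem? of a four-block replicate concatenation with ordered Int boundaries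
theorem getElem?_four_blocks (a b c n : Int) (w g r : String) (j : Nat)
    (h0 : 0 ≤ a) (hab : a ≤ b) (hbc : b ≤ c) (hcn : c ≤ n) :
    (List.replicate a.toNat w ++ (List.replicate (b - a).toNat g
      ++ (List.replicate (c - b).toNat r ++ List.replicate (n - c).toNat w)))[j]?
    = if (j : Int) < a then some w
      else if (j : Int) < b then some g
      else if (j : Int) < c then some r
      else if (j : Int) < n then some w
      else none := by
  rcases lt_or_ge (j : Int) a with h | h
  · rw [List.getElem?_append_left (by simp; omega)]
    simp only [List.getElem?_replicate]
    split_ifs <;> first | rfl | omega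
  · rw [List.getElem?_append_right (by simp; omega)]
    rcases lt_or_ge (j : Int) b with h2 | h2
    · rw [List.getElem?_append_left (by simp; omega)]
      simp only [List.getElem?_replicate, List.length_replicate]
      split_ifs <;> first | rfl | omega
    · rw [List.getElem?_append_right (by simp; omega)]
      rcases lt_or_ge (j : Int) c with h3 | h3
      · rw [List.getElem?_append_left (by simp; omega)]
        simp only [List.getElem?_replicate, List.length_replicate]
        split_ifs <;> first | rfl | omega
      · rw [List.getElem?_append_right (by simp; omega)]
        simp only [List.getElem?_replicate, List.length_replicate]
        split_ifs <;> first | rfl | omega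

-- ===== VERDICT =====
theorem getColourArray_spec : Claim_equal_getColourArray := by
  intro length left middle right _
  unfold Spec_getColourArray getColourArray
  simp only [getColourArray_alt]
  rw [foldl_append_ite3, List.nil_append, PySem.List.pyRange_one]
  apply List.ext_getElem?
  intro j
  rw [getElem?_four_blocks _ _ _ _ _ _ _ j (by omega) (by omega) (by omega) (by omega)]
  by_cases hj : j < (length - 0).toNat
  · rw [List.getElem?_map, List.getElem?_map, List.getElem?_range hj]
    simp only [Option.map_some]
    split_ifs <;> first | rfl | omega
  · rw [List.getElem?_map, List.getElem?_map,
        List.getElem?_eq_none (by simp; omega : (List.range (length - 0).toNat).length ≤ j)]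
    simp only [Option.map_none]
    split_ifs <;> first | rfl | omega
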